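-- pv_equiv track=rewrite | github.com/jojonki/FM-index | fm_index.py | rank_bwt
-- ===== SOURCE A (Python) =====
-- def rank_bwt(bw):
--     ch_count = {}
--     ranks = []
--     for c in bw:
--         if c not in ch_count:
--             ch_count[c] = 0
--         ranks.append(ch_count[c])
--         ch_count[c] += 1
--     return ranks, ch_count
-- ===== SOURCE B (Python) =====
-- def rank_bwt(bw):
--     # Build a per-character index of positions, then assign ranks by group.
--     positions = {}
--     for i, c in enumerate(bw):
--         positions.setdefault(c, []).append(i)
--     ranks = [0] * len(bw)
--     ch_count = {}
--     for c, idxs in positions.items():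
--         for r, i in enumerate(idxs):
--             ranks[i] = r
--         ch_count[c] = len(idxs)
--     return ranks, ch_count
-- ===== Notes on version B (the rewrite author's own statement) =====
-- stated objective: alternative
-- what changed: Replaces the single left-to-right running-count stream with a two-phase build-an-index-then-assign-by-group algorithm: first pass groups positions per character into a dict, second pass writes each rank into a preallocated array by position and derives counts as group sizes.
import Mathlib
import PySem

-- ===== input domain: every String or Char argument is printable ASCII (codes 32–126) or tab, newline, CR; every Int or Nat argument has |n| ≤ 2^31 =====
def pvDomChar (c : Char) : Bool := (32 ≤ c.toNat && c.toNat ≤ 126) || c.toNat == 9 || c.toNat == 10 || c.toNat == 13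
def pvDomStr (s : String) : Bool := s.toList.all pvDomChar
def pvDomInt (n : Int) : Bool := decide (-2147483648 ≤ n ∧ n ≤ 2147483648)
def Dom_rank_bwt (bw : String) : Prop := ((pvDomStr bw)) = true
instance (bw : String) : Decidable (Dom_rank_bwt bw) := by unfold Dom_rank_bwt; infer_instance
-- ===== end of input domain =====

-- B replaces A's running-count stream with a build-a-position-index-then-assign-by-group pass (alternative decomposition, same cost).


-- ===== PORT A =====
-- one loop over bw: running count per character, rank = count so far
def rank_bwt (bw : String) : List Int × (List (String × Int)) :=
  let st := bw.toList.foldl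
    (fun (st : PySem.Dict String Int × List Int) c =>
      let d := if st.1.contains (String.ofList [c]) then st.1 else st.1.insert (String.ofList [c]) 0
      let r := d.getD (String.ofList [c]) 0
      (d.insert (String.ofList [c]) (r + 1), st.2 ++ [r]))
    (PySem.Dict.empty, [])
  (st.2, st.1.items)

-- ===== PORT B =====
-- pass 1: dict of positions per character; pass 2: write ranks by position, counts = group sizes
def rank_bwt_alt (bw : String) : List Int × (List (String × Int)) :=
  let positions := (PySem.List.enumerate bw.toList 0).foldl
    (fun (d : PySem.Dict String (List Int)) p => d.modify (String.ofList [p.2]) [] (· ++ [p.1]))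
    PySem.Dict.empty
  let st := positions.items.foldl
    (fun (st : List Int × PySem.Dict String Int) p =>
      ((PySem.List.enumerate p.2 0).foldl (fun rs q => PySem.List.pySetD rs q.2 q.1) st.1,
       st.2.insert p.1 (p.2.length : Int)))
    (List.replicate bw.toList.length (0 : Int), PySem.Dict.empty)
  (st.1, st.2.items)

-- ===== PRECONDITION & SPEC =====
def Spec_rank_bwt (bw : String) (out : List Int × (List (String × Int))) : Prop := out = rank_bwt_alt bw
instance (bw : String) (out : List Int × (List (String × Int))) : Decidable (Spec_rank_bwt bw out) := by unfold Spec_rank_bwt; infer_instance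

-- ===== CLAIM (what is proved, stated in full; the proofs are below) =====
def Claim_equal_rank_bwt : Prop := ∀ (bw : String), Dom_rank_bwt bw → Spec_rank_bwt bw (rank_bwt bw)

-- ===== LEMMAS AND PROOFS =====

-- A's fold state
def stateA (l : List Char) : PySem.Dict String Int × List Int :=
  l.foldl
    (fun (st : PySem.Dict String Int × List Int) c =>
      let d := if st.1.contains (String.ofList [c]) then st.1 else st.1.insert (String.ofList [c]) 0
      let r := d.getD (String.ofList [c]) 0
      (d.insert (String.ofList [c]) (r + 1), st.2 ++ [r]))
    (PySem.Dict.empty, [])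

-- B's position index
def posD (l : List Char) : PySem.Dict String (List Int) :=
  (PySem.List.enumerate l 0).foldl
    (fun (d : PySem.Dict String (List Int)) p => d.modify (String.ofList [p.2]) [] (· ++ [p.1]))
    PySem.Dict.empty

-- B's rank-writing second pass (ranks component)
def writeAll (rs : List Int) (idxs : List Int) : List Int :=
  (PySem.List.enumerate idxs 0).foldl (fun rs q => PySem.List.pySetD rs q.2 q.1) rs

def pass2 (items : List (String × List Int)) (rs : List Int) : List Int :=
  items.foldl (fun rs p => writeAll rs p.2) rs

theorem pair_split (items : List (String × List Int)) (rs : List Int) (d : PySem.Dict String Int) :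
    items.foldl
      (fun (st : List Int × PySem.Dict String Int) p =>
        ((PySem.List.enumerate p.2 0).foldl (fun rs q => PySem.List.pySetD rs q.2 q.1) st.1,
         st.2.insert p.1 (p.2.length : Int))) (rs, d)
    = (pass2 items rs, items.foldl (fun d p => d.insert p.1 (p.2.length : Int)) d) := by
  induction items generalizing rs d with
  | nil => rfl
  | cons p t ih => simp [pass2, List.foldl_cons, ih, writeAll]

theorem foldl_set_length : ∀ (ps : List (Int × Int)) (rs : List Int),
    (ps.foldl (fun rs q => PySem.List.pySetD rs q.2 q.1) rs).length = rs.length := by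
  intro ps
  induction ps with
  | nil => intro rs; rfl
  | cons q t ih => intro rs; simp [List.foldl_cons, ih, PySem.List.length_pySetD]

theorem length_writeAll (rs idxs : List Int) : (writeAll rs idxs).length = rs.length :=
  foldl_set_length _ rs

theorem foldl_set_append_last : ∀ (ps : List (Int × Int)) (rs : List Int) (z : Int),
    (∀ q ∈ ps, 0 ≤ q.2 ∧ q.2 < (rs.length : Int)) →
    ps.foldl (fun rs q => PySem.List.pySetD rs q.2 q.1) (rs ++ [z])
      = ps.foldl (fun rs q => PySem.List.pySetD rs q.2 q.1) rs ++ [z] := by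
  intro ps
  induction ps with
  | nil => intro rs z _; rfl
  | cons q t ih =>
    intro rs z hb
    obtain ⟨h0, hlt⟩ := hb q (List.mem_cons_self)
    have ht : q.2.toNat < rs.length := by omega
    simp only [List.foldl_cons, PySem.List.pySetD_of_nonneg _ _ h0, List.set_append, ht, if_pos]
    rw [ih (rs.set q.2.toNat q.1) z]
    intro p hp
    have := hb p (List.mem_cons_of_mem _ hp)
    simpa using this

theorem writeAll_append_last (rs idxs : List Int) (z : Int)
    (hb : ∀ i ∈ idxs, 0 ≤ i ∧ i < (rs.length : Int)) :
    writeAll (rs ++ [z]) idxs = writeAll rs idxs ++ [z] := by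
  apply foldl_set_append_last
  intro q hq
  rw [PySem.List.mem_enumerate_iff] at hq
  obtain ⟨k, hk, rfl⟩ := hq
  exact hb _ (List.getElem_mem hk)

theorem pass2_append_last (items : List (String × List Int)) (rs : List Int) (z : Int)
    (hb : ∀ p ∈ items, ∀ i ∈ p.2, 0 ≤ i ∧ i < (rs.length : Int)) :
    pass2 items (rs ++ [z]) = pass2 items rs ++ [z] := by
  induction items generalizing rs with
  | nil => rfl
  | cons p t ih =>
    simp only [pass2, List.foldl_cons]
    rw [writeAll_append_last rs p.2 z (hb p List.mem_cons_self)]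
    have := ih (writeAll rs p.2) (by
      intro q hq i hi
      have := hb q (List.mem_cons_of_mem _ hq) i hi
      rwa [length_writeAll])
    simpa [pass2] using this

theorem nodup_find? {α : Type} [DecidableEq α] {β : Type} (k : α) (v : β) :
    ∀ (xs : List (α × β)), (xs.map Prod.fst).Nodup → (k, v) ∈ xs →
      xs.find? (fun p => p.1 == k) = some (k, v) := by
  intro xs
  induction xs with
  | nil => intro _ h; simp at h
  | cons p t ih =>
    intro hn hm
    rcases List.mem_cons.mp hm with h | h
    · subst h; simp
    · simp only [List.map_cons, List.nodup_cons] at hn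
      have hk : k ∈ t.map Prod.fst := List.mem_map.mpr ⟨_, h, rfl⟩
      have hne : (p.1 == k) = false := by
        rw [beq_eq_false_iff_ne]
        rintro rfl
        exact hn.1 hk
      rw [List.find?_cons, hne]
      exact ih hn.2 h

theorem posD_keys_nodup (l : List Char) : ((posD l).items.map Prod.fst).Nodup := by
  have h := PySem.Dict.nodup_keys_foldl_modify_key (PySem.List.enumerate l 0)
    (fun q => String.ofList [q.2]) ([] : List Int) (fun _ q => (· ++ [q.1]))
    PySem.Dict.empty (by simp [PySem.Dict.keys, PySem.Dict.empty])
  simpa [PySem.Dict.keys, posD] using h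

theorem posD_getD (l : List Char) (k : String) :
    (posD l).getD k []
      = (((PySem.List.enumerate l 0).map (fun q => (String.ofList [q.2], q.1))).filter (fun p => p.1 == k)).map (·.2) := by
  have h := PySem.Dict.getD_foldl_modify_append
    ((PySem.List.enumerate l 0).map (fun q => (String.ofList [q.2], q.1)))
    (PySem.Dict.empty : PySem.Dict String (List Int)) k
  rw [List.foldl_map] at h
  simpa [posD, PySem.Dict.getD, PySem.Dict.get?, PySem.Dict.empty] using h

theorem posD_bounds (l : List Char) :
    ∀ p ∈ (posD l).items, ∀ i ∈ p.2, 0 ≤ i ∧ i < (l.length : Int) := by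
  intro p hp i hi
  have hfind := nodup_find? p.1 p.2 (posD l).items (posD_keys_nodup l) hp
  have hval : (posD l).getD p.1 [] = p.2 := by
    simp [PySem.Dict.getD, PySem.Dict.get?, hfind]
  rw [← hval, posD_getD] at hi
  simp only [List.mem_map, List.mem_filter, List.mem_map] at hi
  obtain ⟨q, ⟨⟨e, he, rfl⟩, -⟩, rfl⟩ := hi
  rw [PySem.List.mem_enumerate_iff] at he
  obtain ⟨j, hj, rfl⟩ := he
  constructor <;> simp <;> omega

theorem posD_snoc (l : List Char) (c : Char) :
    posD (l ++ [c]) = (posD l).modify (String.ofList [c]) [] (· ++ [(l.length : Int)]) := by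
  simp [posD, PySem.List.enumerate_append, List.foldl_append, PySem.List.enumerate_cons]

theorem pass2_upd (k : String) (v : List Int) :
    ∀ (items : List (String × List Int)) (rs : List Int) (z : Int),
      (∀ p ∈ items, ∀ i ∈ p.2, 0 ≤ i ∧ i < (rs.length : Int)) →
      (items.map Prod.fst).Nodup → (k, v) ∈ items →
      pass2 (items.map (fun p => if p.1 == k then (k, v ++ [(rs.length : Int)]) else p)) (rs ++ [z])
        = pass2 items rs ++ [(v.length : Int)] := by
  intro items
  induction items with
  | nil => intro rs z _ _ hm; simp at hm
  | cons p t ih =>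
    intro rs z hb hn hm
    simp only [List.map_cons, List.nodup_cons] at hn
    by_cases hpk : p.1 = k
    · have hpv : p = (k, v) := by
        rcases List.mem_cons.mp hm with h | h
        · exact h.symm
        · exact absurd (List.mem_map.mpr ⟨_, h, rfl⟩) (hpk ▸ hn.1)
      subst hpv
      simp only [List.map_cons, beq_self_eq_true, if_pos, pass2, List.foldl_cons]
      have hmap : t.map (fun p => if p.1 == k then (k, v ++ [(rs.length : Int)]) else p) = t := by
        have h : ∀ q ∈ t, (if (q.1 == k) = true then (k, v ++ [(rs.length : Int)]) else q) = id q := by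
          intro q hq
          have : q.1 ≠ k := fun h => hn.1 (h ▸ List.mem_map.mpr ⟨_, hq, rfl⟩)
          simp [this]
        rw [List.map_congr_left h, List.map_id]
      rw [hmap]
      have hw : writeAll (rs ++ [z]) (v ++ [(rs.length : Int)])
          = writeAll rs v ++ [(v.length : Int)] := by
        unfold writeAll
        rw [PySem.List.enumerate_append, List.foldl_append]
        have hbv : ∀ i ∈ v, 0 ≤ i ∧ i < (rs.length : Int) := hb (k, v) List.mem_cons_self
        have h1 : (PySem.List.enumerate v 0).foldl (fun rs q => PySem.List.pySetD rs q.2 q.1) (rs ++ [z])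
            = writeAll rs v ++ [z] := writeAll_append_last rs v z hbv
        rw [h1]
        have hlen : (writeAll rs v).length = rs.length := length_writeAll rs v
        simp only [PySem.List.enumerate_cons, PySem.List.enumerate_nil, List.foldl_cons, List.foldl_nil]
        rw [PySem.List.pySetD_of_nonneg _ _ (by positivity), List.set_append]
        simp only [hlen]
        simp [writeAll]
      rw [hw]
      have hb2 : ∀ q ∈ t, ∀ i ∈ q.2, 0 ≤ i ∧ i < ((writeAll rs v).length : Int) := by
        rw [length_writeAll]
        intro q hq i hi
        exact hb q (List.mem_cons_of_mem _ hq) i hi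
      have := pass2_append_last t (writeAll rs v) ((v.length : Int)) hb2
      simpa [pass2] using this
    · have hne : (p.1 == k) = false := by rwa [beq_eq_false_iff_ne]
      simp only [List.map_cons, hne, Bool.false_eq_true, if_false, pass2, List.foldl_cons]
      have hm' : (k, v) ∈ t := by
        rcases List.mem_cons.mp hm with h | h
        · exact absurd (congrArg Prod.fst h.symm) hpk
        · exact h
      have hw : writeAll (rs ++ [z]) p.2 = writeAll rs p.2 ++ [z] :=
        writeAll_append_last rs p.2 z (hb p List.mem_cons_self)
      rw [hw]
      have hb' : ∀ q ∈ t, ∀ i ∈ q.2, 0 ≤ i ∧ i < ((writeAll rs p.2).length : Int) := by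
        rw [length_writeAll]
        intro q hq i hi
        exact hb q (List.mem_cons_of_mem _ hq) i hi
      have := ih (writeAll rs p.2) z hb' hn.2 hm'
      rw [length_writeAll] at this
      simpa [pass2] using this

theorem ch_fold_items (g : String × List Int → Int) :
    ∀ (items : List (String × List Int)) (acc : List (String × Int)),
      (items.map Prod.fst).Nodup →
      (∀ p ∈ items, ∀ q ∈ acc, p.1 ≠ q.1) →
      (items.foldl (fun (d : PySem.Dict String Int) p => d.insert p.1 (g p)) (PySem.Dict.mk acc)).items
        = acc ++ items.map (fun p => (p.1, g p)) := by
  intro items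
  induction items with
  | nil => intro acc _ _; simp [PySem.Dict.items]
  | cons p t ih =>
    intro acc hn hd
    simp only [List.map_cons, List.nodup_cons] at hn
    have hc : (PySem.Dict.mk acc).contains p.1 = false := by
      simp only [PySem.Dict.contains, PySem.Dict.items, List.any_eq_false]
      intro q hq
      have := hd p List.mem_cons_self q hq
      simpa [beq_eq_false_iff_ne, ne_comm] using this
    simp only [List.foldl_cons]
    rw [show (PySem.Dict.mk acc).insert p.1 (g p) = PySem.Dict.mk (acc ++ [(p.1, g p)]) by
      simp [PySem.Dict.insert, hc, PySem.Dict.items]]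
    rw [ih (acc ++ [(p.1, g p)]) hn.2 (by
      intro r hr q hq
      rcases List.mem_append.mp hq with h | h
      · exact hd r (List.mem_cons_of_mem _ hr) q h
      · have : q = (p.1, g p) := by simpa using h
        subst this
        exact fun h => hn.1 (h ▸ List.mem_map.mpr ⟨_, hr, rfl⟩))]
    simp

theorem length_pass2 (items : List (String × List Int)) (rs : List Int) :
    (pass2 items rs).length = rs.length := by
  induction items generalizing rs with
  | nil => rfl
  | cons p t ih => simp [pass2, List.foldl_cons] at ih ⊢; rw [ih, length_writeAll]

theorem contains_mapf (d : PySem.Dict String (List Int)) (k : String) :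
    (PySem.Dict.mk (d.items.map (fun p => (p.1, (p.2.length : Int))))).contains k = d.contains k := by
  simp [PySem.Dict.contains, List.any_map, Function.comp_def]

theorem get?_mapf (d : PySem.Dict String (List Int)) (k : String) :
    (PySem.Dict.mk (d.items.map (fun p => (p.1, (p.2.length : Int))))).get? k
      = (d.get? k).map (fun v => (v.length : Int)) := by
  simp only [PySem.Dict.get?, PySem.Dict.items, List.find?_map]
  rcases h : List.find? (fun p => p.1 == k) d.1 with _ | p
  · rw [show List.find? ((fun p => p.1 == k) ∘ fun p => (p.1, (p.2.length : Int))) d.1 = none by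
      simpa [Function.comp_def] using h]
    rw [show d.items = d.1 from rfl, h]
    rfl
  · rw [show List.find? ((fun p => p.1 == k) ∘ fun p => (p.1, (p.2.length : Int))) d.1 = some p by
      simpa [Function.comp_def] using h]
    rw [show d.items = d.1 from rfl, h]
    rfl

theorem mapf_insert (d : PySem.Dict String (List Int)) (k : String) (w : List Int) :
    PySem.Dict.mk ((d.insert k w).items.map (fun p => (p.1, (p.2.length : Int))))
      = (PySem.Dict.mk (d.items.map (fun p => (p.1, (p.2.length : Int))))).insert k ((w.length : Int)) := by
  simp only [PySem.Dict.insert, contains_mapf, PySem.Dict.items]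
  by_cases hc : d.contains k = true
  · simp only [hc, if_pos, List.map_map]
    congr 1
    apply List.map_congr_left
    intro p _
    by_cases hp : p.1 = k <;> simp [hp, Function.comp_def]
  · simp only [if_neg hc, PySem.Dict.items, List.map_append, List.map_cons, List.map_nil]

theorem writeAll_single_last (X : List Int) (m z : Int) (hm : m = (X.length : Int)) :
    writeAll (X ++ [z]) [m] = X ++ [(0 : Int)] := by
  subst hm
  unfold writeAll
  simp only [PySem.List.enumerate_cons, PySem.List.enumerate_nil, List.foldl_cons, List.foldl_nil]
  rw [PySem.List.pySetD_of_nonneg _ _ (by positivity), List.set_append]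
  simp

theorem main_inv (l : List Char) :
    stateA l = (PySem.Dict.mk ((posD l).items.map (fun p => (p.1, (p.2.length : Int)))),
                pass2 (posD l).items (List.replicate l.length 0)) := by
  induction l using List.reverseRecOn with
  | nil => rfl
  | append_singleton l c ih =>
    have hfold : stateA (l ++ [c])
        = ((if (stateA l).1.contains (String.ofList [c]) then (stateA l).1
            else (stateA l).1.insert (String.ofList [c]) 0).insert (String.ofList [c])
              ((if (stateA l).1.contains (String.ofList [c]) then (stateA l).1
                else (stateA l).1.insert (String.ofList [c]) 0).getD (String.ofList [c]) 0 + 1),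
           (stateA l).2 ++ [(if (stateA l).1.contains (String.ofList [c]) then (stateA l).1
                else (stateA l).1.insert (String.ofList [c]) 0).getD (String.ofList [c]) 0]) := by
      rw [stateA, List.foldl_append]
      rfl
    rw [hfold, ih]
    have hsnoc : posD (l ++ [c])
        = (posD l).insert (String.ofList [c]) ((posD l).getD (String.ofList [c]) [] ++ [(l.length : Int)]) := by
      rw [posD_snoc]
      rfl
    by_cases hc : (posD l).contains (String.ofList [c]) = true
    · -- character already seen
      obtain ⟨pr, hpr⟩ : ∃ pr, (posD l).items.find? (fun p => p.1 == String.ofList [c]) = some pr := by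
        cases hfe : (posD l).items.find? (fun p => p.1 == String.ofList [c]) with
        | none =>
          have : (posD l).get? (String.ofList [c]) = none := by
            simp [PySem.Dict.get?, hfe]
          rw [PySem.Dict.get?_eq_none_iff_contains] at this
          rw [this] at hc
          exact absurd hc (by simp)
        | some pr => exact ⟨pr, rfl⟩
      obtain ⟨k1, v⟩ := pr
      have hk1 : k1 = String.ofList [c] := by
        have := List.find?_some hpr
        simpa using this
      subst hk1
      have hmem : (String.ofList [c], v) ∈ (posD l).items := List.mem_of_find?_eq_some hpr
      have hget : (posD l).get? (String.ofList [c]) = some v := by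
        simp [PySem.Dict.get?, hpr]
      have hgetD : (posD l).getD (String.ofList [c]) [] = v := by
        simp [PySem.Dict.getD, hget]
      have hcm : (PySem.Dict.mk ((posD l).items.map (fun p => (p.1, (p.2.length : Int))))).contains
          (String.ofList [c]) = true := by rw [contains_mapf]; exact hc
      have hgm : (PySem.Dict.mk ((posD l).items.map (fun p => (p.1, (p.2.length : Int))))).getD
          (String.ofList [c]) 0 = (v.length : Int) := by
        simp [PySem.Dict.getD, get?_mapf, hget]
      rw [hsnoc, hgetD]
      simp only [hcm, if_pos, hgm]
      refine Prod.ext ?_ ?_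
      · rw [mapf_insert]
        have hlen : (((v ++ [(l.length : Int)]).length : Nat) : Int) = (v.length : Int) + 1 := by simp
        rw [hlen]
      · rw [PySem.Dict.items_insert, if_pos hc]
        rw [List.length_append, List.length_singleton, List.replicate_succ']
        have hupd := pass2_upd (String.ofList [c]) v (posD l).items (List.replicate l.length 0) 0
          (by simpa using posD_bounds l) (posD_keys_nodup l) hmem
        simp only [List.length_replicate] at hupd
        rw [hupd]
    · -- first occurrence of the character
      have hcf : (posD l).contains (String.ofList [c]) = false := by simpa using hc
      have hgetD : (posD l).getD (String.ofList [c]) [] = [] := by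
        simp [PySem.Dict.getD, (PySem.Dict.get?_eq_none_iff_contains _ _).mpr hcf]
      have hcm : (PySem.Dict.mk ((posD l).items.map (fun p => (p.1, (p.2.length : Int))))).contains
          (String.ofList [c]) = false := by rw [contains_mapf]; exact hcf
      rw [hsnoc, hgetD]
      simp only [hcm, Bool.false_eq_true, if_false, List.nil_append]
      rw [PySem.Dict.getD_insert_self, PySem.Dict.insert_insert_self]
      refine Prod.ext ?_ ?_
      · rw [mapf_insert]
        norm_num
      · rw [PySem.Dict.items_insert, if_neg (by simp [hcf])]
        rw [List.length_append, List.length_singleton, List.replicate_succ']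
        unfold pass2
        rw [List.foldl_append]
        have h1 : (posD l).items.foldl (fun rs p => writeAll rs p.2)
            (List.replicate l.length (0 : Int) ++ [0])
            = (posD l).items.foldl (fun rs p => writeAll rs p.2) (List.replicate l.length (0 : Int)) ++ [0] :=
          pass2_append_last _ _ _ (by simpa using posD_bounds l)
        rw [h1]
        simp only [List.foldl_cons, List.foldl_nil]
        have hX : ((posD l).items.foldl (fun rs p => writeAll rs p.2)
            (List.replicate l.length (0 : Int))).length = l.length := by
          have := length_pass2 (posD l).items (List.replicate l.length (0 : Int))
          simpa [pass2] using this
        rw [writeAll_single_last _ _ _ (by rw [hX])]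

-- ===== VERDICT (by name: the statement is the Claim_ definition above) =====
theorem rank_bwt_spec : Claim_equal_rank_bwt := by
  intro bw _
  unfold Spec_rank_bwt
  have hA : rank_bwt bw = ((stateA bw.toList).2, (stateA bw.toList).1.items) := rfl
  have hB : rank_bwt_alt bw
      = (pass2 (posD bw.toList).items (List.replicate bw.toList.length 0),
         ((posD bw.toList).items.foldl
           (fun (d : PySem.Dict String Int) p => d.insert p.1 ((p.2.length : Int))) PySem.Dict.empty).items) := by
    have h0 : rank_bwt_alt bw
        = (((posD bw.toList).items.foldl
             (fun (st : List Int × PySem.Dict String Int) p =>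
               ((PySem.List.enumerate p.2 0).foldl (fun rs q => PySem.List.pySetD rs q.2 q.1) st.1,
                st.2.insert p.1 (p.2.length : Int)))
             (List.replicate bw.toList.length (0 : Int), PySem.Dict.empty)).1,
           ((posD bw.toList).items.foldl
             (fun (st : List Int × PySem.Dict String Int) p =>
               ((PySem.List.enumerate p.2 0).foldl (fun rs q => PySem.List.pySetD rs q.2 q.1) st.1,
                st.2.insert p.1 (p.2.length : Int)))
             (List.replicate bw.toList.length (0 : Int), PySem.Dict.empty)).2.items) := rfl
    rw [h0, pair_split]
  rw [hA, hB, main_inv]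
  refine Prod.ext ?_ ?_
  · rfl
  · rw [show (PySem.Dict.empty : PySem.Dict String Int) = PySem.Dict.mk [] from rfl]
    rw [ch_fold_items _ _ [] (posD_keys_nodup _) (by intro p _ q hq; simp at hq)]
    simp [PySem.Dict.items]
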